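-- pv_equiv track=rewrite | github.com/rtmendes/mngr | scripts/junit_test_summary.py | _assemble_with_truncation
-- ===== SOURCE A (Python) =====
-- from collections.abc import Sequence
--
-- def _assemble_with_truncation(
--     header_lines: Sequence[str],
--     failure_blocks: Sequence[str],
--     table_header: Sequence[str],
--     rows: Sequence[str],
--     max_chars: int,
-- ) -> str:
--     """Join header + failure detail blocks + table, dropping trailing items if needed.
--
--     Layout: stats header, then the per-failure `<details>` blocks (so readers
--     see actual error output first), then the per-test runs/retries table.
--
--     Failures take priority over table rows: if everything won't fit under
--     `max_chars`, we keep as many failure blocks as fit and then fill the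
--     remainder with table rows. A footer discloses how many of each were
--     omitted. If the full body fits, no footer is emitted.
--     """
--     stats = "\n".join(header_lines) + "\n"
--     failures_heading = "## Failures\n\n" if failure_blocks else ""
--     table_head = "\n".join(table_header) + "\n"
--
--     # +2 between failure blocks for the blank line separator; +1 per row for
--     # its terminating newline.
--     failure_size = sum(len(b) + 2 for b in failure_blocks)
--     rows_size = sum(len(r) + 1 for r in rows)
--     fixed_size = len(stats) + len(failures_heading) + len(table_head)
--
--     # Fast path: the whole document fits under max_chars without a footer.
--     if fixed_size + failure_size + rows_size <= max_chars:
--         failures_body = ("\n\n".join(failure_blocks) + "\n\n") if failure_blocks else ""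
--         rows_body = ("\n".join(rows) + "\n") if rows else ""
--         return stats + failures_heading + failures_body + table_head + rows_body
--
--     # Truncation path. Reserve headroom for the footer so we do not emit
--     # items we will later have to drop again once the footer is appended.
--     # `max(0, ...)` keeps the bound non-negative if the fixed overhead alone
--     # already exceeds max_chars; in that degenerate case we keep nothing
--     # droppable and the result may slightly exceed max_chars (the stats
--     # header + footer is what we owe the caller -- there is nothing else
--     # we can cut without losing the stats themselves).
--     footer_headroom = 240
--     budget = max(0, max_chars - fixed_size - footer_headroom)
--
--     kept_failures: list[str] = []
--     used = 0
--     for block in failure_blocks: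
--         cost = len(block) + 2
--         if used + cost > budget:
--             break
--         kept_failures.append(block)
--         used += cost
--
--     kept_rows: list[str] = []
--     for row in rows:
--         cost = len(row) + 1
--         if used + cost > budget:
--             break
--         kept_rows.append(row)
--         used += cost
--
--     failures_body = ("\n\n".join(kept_failures) + "\n\n") if kept_failures else ""
--     rows_body = ("\n".join(kept_rows) + "\n") if kept_rows else ""
--
--     omitted_failures = len(failure_blocks) - len(kept_failures)
--     omitted_rows = len(rows) - len(kept_rows)
--     notes: list[str] = []
--     if omitted_failures:
--         notes.append(f"{omitted_failures} failure detail block(s) omitted")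
--     if omitted_rows:
--         notes.append(f"{omitted_rows} additional test row(s) omitted")
--     footer = (
--         f"\n_... {' and '.join(notes)} to keep the summary under "
--         f"{max_chars} characters. See the workflow run page for the full list._\n"
--     )
--     return stats + failures_heading + failures_body + table_head + rows_body + footer
-- ===== SOURCE B (Python) =====
-- from collections.abc import Sequence
--
--
-- def _prefix_sums(costs) -> list[int]:
--     acc: list[int] = []
--     total = 0
--     for c in costs:
--         total += c
--         acc.append(total)
--     return acc
--
--
-- def _cut(prefix: list[int], limit: int) -> int:
--     """Largest n with prefix[n-1] <= limit, by binary search (prefix is strictly increasing)."""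
--     lo, hi = 0, len(prefix)
--     while lo < hi:
--         mid = (lo + hi) // 2
--         if prefix[mid] <= limit:
--             lo = mid + 1
--         else:
--             hi = mid
--     return lo
--
--
-- def _join_doc(stats, heading, failures, table, rows, footer) -> str:
--     parts = [stats, heading]
--     if failures:
--         parts.append("\n\n".join(failures) + "\n\n")
--     parts.append(table)
--     if rows:
--         parts.append("\n".join(rows) + "\n")
--     parts.append(footer)
--     return "".join(parts)
--
--
-- def _truncated_doc(stats, heading, failure_blocks, table, rows, budget, max_chars):
--     fpre = _prefix_sums(len(b) + 2 for b in failure_blocks)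
--     rpre = _prefix_sums(len(r) + 1 for r in rows)
--     nf = _cut(fpre, budget)
--     nr = _cut(rpre, budget - (fpre[nf - 1] if nf else 0))
--     notes: list[str] = []
--     if nf < len(failure_blocks):
--         notes.append(f"{len(failure_blocks) - nf} failure detail block(s) omitted")
--     if nr < len(rows):
--         notes.append(f"{len(rows) - nr} additional test row(s) omitted")
--     footer = (
--         f"\n_... {' and '.join(notes)} to keep the summary under "
--         f"{max_chars} characters. See the workflow run page for the full list._\n"
--     )
--     return _join_doc(stats, heading, failure_blocks[:nf], table, rows[:nr], footer)
--
--
-- def _assemble_with_truncation(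
--     header_lines: Sequence[str],
--     failure_blocks: Sequence[str],
--     table_header: Sequence[str],
--     rows: Sequence[str],
--     max_chars: int,
-- ) -> str:
--     stats = "\n".join(header_lines) + "\n"
--     heading = "## Failures\n\n" if failure_blocks else ""
--     table = "\n".join(table_header) + "\n"
--     fixed = len(stats) + len(heading) + len(table)
--
--     total = fixed + sum(len(b) + 2 for b in failure_blocks) + sum(len(r) + 1 for r in rows)
--     if total <= max_chars:
--         return _join_doc(stats, heading, failure_blocks, table, rows, "")
--
--     return _truncated_doc(stats, heading, failure_blocks, table, rows,
--                           max(0, max_chars - fixed - 240), max_chars)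
-- ===== Notes on version B (the rewrite author's own statement) =====
-- stated objective: alternative
-- what changed: A's two sequential greedy break-loops are replaced by prefix-sum lists of the per-item costs with a hand-rolled binary search (_cut) to find the kept counts (correct because positive costs make the prefix sums strictly increasing), and the duplicated string assembly of the two return paths is factored into one shared _join_doc parts-list renderer.
import Mathlib
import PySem

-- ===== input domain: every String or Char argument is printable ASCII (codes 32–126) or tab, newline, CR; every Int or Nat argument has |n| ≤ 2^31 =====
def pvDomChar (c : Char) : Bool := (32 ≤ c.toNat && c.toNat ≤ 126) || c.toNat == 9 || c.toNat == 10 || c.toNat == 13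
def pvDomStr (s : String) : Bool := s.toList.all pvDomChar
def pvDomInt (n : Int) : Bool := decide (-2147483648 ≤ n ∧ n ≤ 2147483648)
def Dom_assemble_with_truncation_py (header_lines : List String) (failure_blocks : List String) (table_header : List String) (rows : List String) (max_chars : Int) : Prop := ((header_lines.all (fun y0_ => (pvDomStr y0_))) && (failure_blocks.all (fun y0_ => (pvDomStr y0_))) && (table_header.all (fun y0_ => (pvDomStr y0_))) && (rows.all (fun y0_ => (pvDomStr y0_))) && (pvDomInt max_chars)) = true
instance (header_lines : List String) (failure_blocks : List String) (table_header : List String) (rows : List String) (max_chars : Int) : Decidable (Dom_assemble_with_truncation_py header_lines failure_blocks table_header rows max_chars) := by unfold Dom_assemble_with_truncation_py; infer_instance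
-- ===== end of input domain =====

-- B replaces A's two sequential greedy break-loops by prefix sums + binary search for the
-- kept counts and factors the document assembly into one shared rendering helper (alternative
-- decomposition, same asymptotic cost).

-- ===== PORT A =====
-- A's `for block in failure_blocks: … if used+cost > budget: break; kept.append(…)` loop
-- (and the identical rows loop), as structural recursion over (list, used).
def pvGreedyKeep (cost : String → Int) (budget : Int) : List String → Int → (List String × Int)
  | [], used => ([], used)
  | b :: bs, used =>
    if used + cost b > budget then ([], used)
    else
      let r := pvGreedyKeep cost budget bs (used + cost b)
      (b :: r.1, r.2)

def assemble_with_truncation_py (header_lines : List String) (failure_blocks : List String) (table_header : List String) (rows : List String) (max_chars : Int) : String :=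
  let stats := PySem.Chars.join ['\n'] (header_lines.map String.toList) ++ ['\n']
  let failures_heading := if failure_blocks.isEmpty then [] else "## Failures\n\n".toList
  let table_head := PySem.Chars.join ['\n'] (table_header.map String.toList) ++ ['\n']
  let failure_size : Int := (failure_blocks.map (fun b => (b.toList.length : Int) + 2)).sum
  let rows_size : Int := (rows.map (fun r => (r.toList.length : Int) + 1)).sum
  let fixed_size : Int := (stats.length : Int) + (failures_heading.length : Int) + (table_head.length : Int)
  if fixed_size + failure_size + rows_size ≤ max_chars then
    let failures_body := if failure_blocks.isEmpty then [] else
      PySem.Chars.join "\n\n".toList (failure_blocks.map String.toList) ++ "\n\n".toList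
    let rows_body := if rows.isEmpty then [] else
      PySem.Chars.join ['\n'] (rows.map String.toList) ++ ['\n']
    String.ofList (stats ++ failures_heading ++ failures_body ++ table_head ++ rows_body)
  else
    let budget := max 0 (max_chars - fixed_size - 240)
    let kf := pvGreedyKeep (fun b => (b.toList.length : Int) + 2) budget failure_blocks 0
    let kept_failures := kf.1
    let kr := pvGreedyKeep (fun r => (r.toList.length : Int) + 1) budget rows kf.2
    let kept_rows := kr.1
    let failures_body := if kept_failures.isEmpty then [] else
      PySem.Chars.join "\n\n".toList (kept_failures.map String.toList) ++ "\n\n".toList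
    let rows_body := if kept_rows.isEmpty then [] else
      PySem.Chars.join ['\n'] (kept_rows.map String.toList) ++ ['\n']
    let omitted_failures : Int := (failure_blocks.length : Int) - (kept_failures.length : Int)
    let omitted_rows : Int := (rows.length : Int) - (kept_rows.length : Int)
    let notes : List (List Char) :=
      (if omitted_failures ≠ 0 then [PySem.Int.toChars omitted_failures ++ " failure detail block(s) omitted".toList] else []) ++
      (if omitted_rows ≠ 0 then [PySem.Int.toChars omitted_rows ++ " additional test row(s) omitted".toList] else [])
    let footer := "\n_... ".toList ++ PySem.Chars.join " and ".toList notes ++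
      " to keep the summary under ".toList ++ PySem.Int.toChars max_chars ++
      " characters. See the workflow run page for the full list._\n".toList
    String.ofList (stats ++ failures_heading ++ failures_body ++ table_head ++ rows_body ++ footer)

-- ===== PORT B =====
-- _prefix_sums: `total = 0; for c in costs: total += c; acc.append(total)`.
def pvPrefixSums : List Int → Int → List Int
  | [], _ => []
  | c :: cs, total => (total + c) :: pvPrefixSums cs (total + c)

-- _cut's `while lo < hi` binary-search loop.
def pvCutGo (pre : List Int) (limit : Int) (lo hi : Nat) : Nat :=
  if _h : lo < hi then
    if pre.getD ((lo + hi) / 2) 0 ≤ limit then pvCutGo pre limit ((lo + hi) / 2 + 1) hi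
    else pvCutGo pre limit lo ((lo + hi) / 2)
  else lo
termination_by hi - lo
decreasing_by all_goals omega

def pvCut (pre : List Int) (limit : Int) : Nat := pvCutGo pre limit 0 pre.length

-- _join_doc: the parts list built then joined by "".join.
def pvJoinDoc (stats heading : List Char) (failures : List String) (table : List Char) (rws : List String) (footer : List Char) : String :=
  String.ofList (stats ++ heading ++
    (if failures.isEmpty then [] else PySem.Chars.join "\n\n".toList (failures.map String.toList) ++ "\n\n".toList) ++
    table ++
    (if rws.isEmpty then [] else PySem.Chars.join ['\n'] (rws.map String.toList) ++ ['\n']) ++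
    footer)

def pvTruncatedDoc (stats heading : List Char) (failure_blocks : List String) (table : List Char) (rows : List String) (budget max_chars : Int) : String :=
  let fpre := pvPrefixSums (failure_blocks.map (fun b => (b.toList.length : Int) + 2)) 0
  let rpre := pvPrefixSums (rows.map (fun r => (r.toList.length : Int) + 1)) 0
  let nf := pvCut fpre budget
  let nr := pvCut rpre (budget - (if nf ≠ 0 then PySem.List.pyGetD fpre ((nf : Int) - 1) 0 else 0))
  let notes : List (List Char) :=
    (if nf < failure_blocks.length then [PySem.Int.toChars ((failure_blocks.length : Int) - (nf : Int)) ++ " failure detail block(s) omitted".toList] else []) ++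
    (if nr < rows.length then [PySem.Int.toChars ((rows.length : Int) - (nr : Int)) ++ " additional test row(s) omitted".toList] else [])
  let footer := "\n_... ".toList ++ PySem.Chars.join " and ".toList notes ++
    " to keep the summary under ".toList ++ PySem.Int.toChars max_chars ++
    " characters. See the workflow run page for the full list._\n".toList
  pvJoinDoc stats heading (failure_blocks.take nf) table (rows.take nr) footer

def assemble_with_truncation_py_alt (header_lines : List String) (failure_blocks : List String) (table_header : List String) (rows : List String) (max_chars : Int) : String :=
  let stats := PySem.Chars.join ['\n'] (header_lines.map String.toList) ++ ['\n']
  let heading := if failure_blocks.isEmpty then [] else "## Failures\n\n".toList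
  let table := PySem.Chars.join ['\n'] (table_header.map String.toList) ++ ['\n']
  let fixed : Int := (stats.length : Int) + (heading.length : Int) + (table.length : Int)
  let total := fixed + (failure_blocks.map (fun b => (b.toList.length : Int) + 2)).sum + (rows.map (fun r => (r.toList.length : Int) + 1)).sum
  if total ≤ max_chars then
    pvJoinDoc stats heading failure_blocks table rows []
  else
    pvTruncatedDoc stats heading failure_blocks table rows (max 0 (max_chars - fixed - 240)) max_chars

-- ===== PRECONDITION & SPEC =====
def Spec_assemble_with_truncation_py (header_lines : List String) (failure_blocks : List String) (table_header : List String) (rows : List String) (max_chars : Int) (out : String) : Prop := out = assemble_with_truncation_py_alt header_lines failure_blocks table_header rows max_chars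
instance (header_lines : List String) (failure_blocks : List String) (table_header : List String) (rows : List String) (max_chars : Int) (out : String) : Decidable (Spec_assemble_with_truncation_py header_lines failure_blocks table_header rows max_chars out) := by unfold Spec_assemble_with_truncation_py; infer_instance

-- ===== CLAIM =====
def Claim_equal_assemble_with_truncation_py : Prop := ∀ (header_lines : List String) (failure_blocks : List String) (table_header : List String) (rows : List String) (max_chars : Int), Dom_assemble_with_truncation_py header_lines failure_blocks table_header rows max_chars → Spec_assemble_with_truncation_py header_lines failure_blocks table_header rows max_chars (assemble_with_truncation_py header_lines failure_blocks table_header rows max_chars)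


-- ===== LEMMAS AND PROOFS =====

-- Shifting the accumulator shifts every prefix sum.
lemma pvPrefixSums_shift (cs : List Int) (a t : Int) :
    pvPrefixSums cs (a + t) = (pvPrefixSums cs t).map (a + ·) := by
  induction cs generalizing t with
  | nil => rfl
  | cons c cs ih => simp [pvPrefixSums, ← ih, add_assoc]

lemma pvPrefixSums_length (cs : List Int) (t : Int) :
    (pvPrefixSums cs t).length = cs.length := by
  induction cs generalizing t with
  | nil => rfl
  | cons c cs ih => simp [pvPrefixSums, ih]

-- With positive costs every prefix sum from t exceeds t.
lemma pvPrefixSums_pos (cs : List Int) (t : Int) (hpos : ∀ c ∈ cs, 0 < c) :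
    ∀ p ∈ pvPrefixSums cs t, t < p := by
  induction cs generalizing t with
  | nil => simp [pvPrefixSums]
  | cons c cs ih =>
    intro p hp
    simp only [pvPrefixSums, List.mem_cons] at hp
    have hc : 0 < c := hpos c (by simp)
    rcases hp with h | h
    · omega
    · have := ih (t + c) (fun d hd => hpos d (by simp [hd])) p h
      omega

-- With positive costs the prefix sums are strictly increasing.
lemma pvPrefixSums_pairwise (cs : List Int) (t : Int) (hpos : ∀ c ∈ cs, 0 < c) :
    (pvPrefixSums cs t).Pairwise (· < ·) := by
  induction cs generalizing t with
  | nil => simp [pvPrefixSums]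
  | cons c cs ih =>
    simp only [pvPrefixSums, List.pairwise_cons]
    exact ⟨pvPrefixSums_pos cs (t + c) (fun d hd => hpos d (by simp [hd])),
           ih (t + c) (fun d hd => hpos d (by simp [hd]))⟩

-- The k-th prefix sum is the sum of the first k+1 costs.
lemma pvPrefixSums_getD (cs : List Int) (t : Int) (k : Nat) :
    (pvPrefixSums cs t).getD k 0 = if k < cs.length then t + (cs.take (k + 1)).sum else 0 := by
  induction cs generalizing t k with
  | nil => simp [pvPrefixSums]
  | cons c cs ih =>
    cases k with
    | zero => simp [pvPrefixSums]
    | succ k =>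
      simp only [pvPrefixSums, List.getD_cons_succ, ih (t + c) k, List.length_cons,
        List.take_succ_cons, List.sum_cons]
      by_cases h : k < cs.length
      · simp [h, Nat.succ_lt_succ h, add_assoc]
      · simp [h]

-- In a strictly increasing list, affordability of the i-th entry means i is below the count.
lemma pvSorted_getD_iff (l : List Int) (B : Int) (hl : l.Pairwise (· < ·)) :
    ∀ i < l.length, (l.getD i 0 ≤ B ↔ i < l.countP (fun p => p ≤ B)) := by
  induction l with
  | nil => simp
  | cons x xs ih =>
    rw [List.pairwise_cons] at hl
    intro i hi
    by_cases hx : x ≤ B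
    · have hc : (x :: xs).countP (fun p => p ≤ B) = xs.countP (fun p => p ≤ B) + 1 := by
        simp [hx]
      cases i with
      | zero => simp [hc, hx]
      | succ j =>
        have hj := ih hl.2 j (by simpa using hi)
        simp only [List.getD_cons_succ, hc]
        constructor
        · intro h; have := hj.1 h; omega
        · intro h; exact hj.2 (by omega)
    · have hzero : xs.countP (fun p => p ≤ B) = 0 :=
        List.countP_eq_zero.mpr (fun p hp => by
          have := hl.1 p hp; simp only [decide_eq_true_eq]; omega)
      have hc : (x :: xs).countP (fun p => p ≤ B) = 0 := by
        simp [hx, hzero]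
      cases i with
      | zero => simp [hc, hx]
      | succ j =>
        have hjlen : j < xs.length := by simpa using hi
        have hmem : xs.getD j 0 ∈ xs := by
          rw [List.getD_eq_getElem _ _ hjlen]; exact List.getElem_mem hjlen
        have hgt := hl.1 _ hmem
        simp only [List.getD_cons_succ, hc]
        constructor
        · intro h; omega
        · intro h; omega

-- The binary-search loop lands exactly on the count, given the sorted characterisation.
lemma pvCutGo_eq (pre : List Int) (B : Int)
    (hiff : ∀ i < pre.length, (pre.getD i 0 ≤ B ↔ i < pre.countP (fun p => p ≤ B))) :
    ∀ n lo hi, hi - lo ≤ n → lo ≤ pre.countP (fun p => p ≤ B) →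
      pre.countP (fun p => p ≤ B) ≤ hi → hi ≤ pre.length →
      pvCutGo pre B lo hi = pre.countP (fun p => p ≤ B) := by
  intro n
  induction n with
  | zero =>
    intro lo hi h1 h2 h3 h4
    rw [pvCutGo, dif_neg (by omega)]
    omega
  | succ n ih =>
    intro lo hi h1 h2 h3 h4
    rw [pvCutGo]
    by_cases h : lo < hi
    · rw [dif_pos h]
      by_cases hp : pre.getD ((lo + hi) / 2) 0 ≤ B
      · rw [if_pos hp]
        have hk := (hiff ((lo + hi) / 2) (by omega)).1 hp
        exact ih ((lo + hi) / 2 + 1) hi (by omega) (by omega) h3 h4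
      · rw [if_neg hp]
        have hk : ¬ (lo + hi) / 2 < pre.countP (fun p => p ≤ B) :=
          fun hlt => hp ((hiff ((lo + hi) / 2) (by omega)).2 hlt)
        exact ih lo ((lo + hi) / 2) (by omega) h2 (by omega) (by omega)
    · rw [dif_neg h]; omega

-- _cut on a strictly increasing prefix-sum list = the number of affordable prefixes.
lemma pvCut_eq_countP (cs : List Int) (B : Int) (hpos : ∀ c ∈ cs, 0 < c) :
    pvCut (pvPrefixSums cs 0) B = (pvPrefixSums cs 0).countP (fun p => p ≤ B) := by
  exact pvCutGo_eq _ B (pvSorted_getD_iff _ B (pvPrefixSums_pairwise cs 0 hpos))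
    (pvPrefixSums cs 0).length 0 (pvPrefixSums cs 0).length (by omega) (by omega)
    List.countP_le_length (by omega)

-- Core: A's greedy break-loop keeps exactly the items whose prefix sum is affordable.
lemma pvGreedy_eq_take (cost : String → Int) (budget : Int) (xs : List String) (used : Int)
    (hpos : ∀ x ∈ xs, 0 < cost x) :
    pvGreedyKeep cost budget xs used =
      (xs.take ((pvPrefixSums (xs.map cost) used).countP (fun p => p ≤ budget)),
       used + ((xs.map cost).take ((pvPrefixSums (xs.map cost) used).countP (fun p => p ≤ budget))).sum) := by
  induction xs generalizing used with
  | nil => simp [pvGreedyKeep, pvPrefixSums]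
  | cons b bs ih =>
    have hb : 0 < cost b := hpos b (by simp)
    by_cases h : used + cost b > budget
    · have hall : ∀ p ∈ pvPrefixSums (cost b :: bs.map cost) used, ¬ p ≤ budget := by
        intro p hp
        have h1 : used + cost b ≤ p := by
          simp only [pvPrefixSums, List.mem_cons] at hp
          rcases hp with rfl | hp
          · omega
          · have := pvPrefixSums_pos (bs.map cost) (used + cost b)
              (by intro c hc; rcases List.mem_map.mp hc with ⟨x, hx, rfl⟩; exact hpos x (by simp [hx])) p hp
            omega
        omega
      have hcount' : (pvPrefixSums (cost b :: bs.map cost) used).countP (fun p => p ≤ budget) = 0 := by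
        rw [List.countP_eq_zero]; intro p hp; simpa using hall p hp
      simp only [pvGreedyKeep, if_pos h, List.map_cons, hcount']
      simp
    · rw [gt_iff_lt, not_lt] at h
      have ih' := ih (used + cost b) (fun x hx => hpos x (by simp [hx]))
      have hcount : (pvPrefixSums ((b :: bs).map cost) used).countP (fun p => p ≤ budget)
          = (pvPrefixSums (bs.map cost) (used + cost b)).countP (fun p => p ≤ budget) + 1 := by
        simp [pvPrefixSums, h]
      simp only [pvGreedyKeep, if_neg (by omega : ¬ used + cost b > budget), ih', hcount]
      simp [List.take_succ_cons, List.sum_cons, add_assoc]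

-- countP over a shifted prefix list is countP against the shifted budget.
lemma countP_shift (cs : List Int) (a B : Int) :
    (pvPrefixSums cs a).countP (fun p => p ≤ B) =
      (pvPrefixSums cs 0).countP (fun p => p ≤ B - a) := by
  have h := pvPrefixSums_shift cs a 0
  rw [(by ring_nf : a = a + 0), h, List.countP_map]
  apply List.countP_congr
  intro p _
  simp only [Function.comp]
  constructor <;> (intro hh; simp_all; omega)

lemma countP_le_length_prefix (cs : List Int) (t B : Int) :
    (pvPrefixSums cs t).countP (fun p => p ≤ B) ≤ cs.length := by
  calc (pvPrefixSums cs t).countP (fun p => p ≤ B) ≤ (pvPrefixSums cs t).length :=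
        List.countP_le_length
    _ = cs.length := pvPrefixSums_length cs t

-- B's `fpre[nf-1] if nf else 0` equals the sum of the first nf costs.
lemma consumed_eq_sum_take (cs : List Int) (B : Int) :
    (if (pvPrefixSums cs 0).countP (fun p => p ≤ B) ≠ 0 then
        PySem.List.pyGetD (pvPrefixSums cs 0) (((pvPrefixSums cs 0).countP (fun p => p ≤ B) : Int) - 1) 0
      else 0)
    = (cs.take ((pvPrefixSums cs 0).countP (fun p => p ≤ B))).sum := by
  set k := (pvPrefixSums cs 0).countP (fun p => p ≤ B) with hk
  by_cases h0 : k = 0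
  · simp [h0]
  · have hkle : k ≤ cs.length := countP_le_length_prefix cs 0 B
    have hklt : k - 1 < cs.length := by omega
    have hcast : ((k : Int) - 1) = ((k - 1 : Nat) : Int) := by omega
    rw [if_pos h0, hcast, PySem.List.pyGetD_natCast, pvPrefixSums_getD cs 0 (k - 1),
      if_pos hklt]
    have : k - 1 + 1 = k := by omega
    simp [this]

lemma ite_omitted (len n : Nat) (hle : n ≤ len) (body : List (List Char)) :
    (if (len : Int) - (n : Int) ≠ 0 then body else []) = (if n < len then body else []) := by
  split_ifs with h1 h2 <;> first | rfl | omega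

-- The two truncation branches agree once the greedy loops and the binary searches
-- are both characterised by countP over the prefix sums.
lemma else_branch (fb rws : List String) (budget mc : Int) (stats heading table : List Char) :
    String.ofList (stats ++ heading ++
      (if (pvGreedyKeep (fun b => (b.toList.length : Int) + 2) budget fb 0).1.isEmpty = true then []
       else PySem.Chars.join "\n\n".toList (List.map String.toList (pvGreedyKeep (fun b => (b.toList.length : Int) + 2) budget fb 0).1) ++ "\n\n".toList) ++ table ++
      (if (pvGreedyKeep (fun r => (r.toList.length : Int) + 1) budget rws (pvGreedyKeep (fun b => (b.toList.length : Int) + 2) budget fb 0).2).1.isEmpty = true then []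
       else PySem.Chars.join ['\n'] (List.map String.toList (pvGreedyKeep (fun r => (r.toList.length : Int) + 1) budget rws (pvGreedyKeep (fun b => (b.toList.length : Int) + 2) budget fb 0).2).1) ++ ['\n']) ++
      ("\n_... ".toList ++ PySem.Chars.join " and ".toList
        ((if (fb.length : Int) - ((pvGreedyKeep (fun b => (b.toList.length : Int) + 2) budget fb 0).1.length : Int) ≠ 0 then
            [PySem.Int.toChars ((fb.length : Int) - ((pvGreedyKeep (fun b => (b.toList.length : Int) + 2) budget fb 0).1.length : Int)) ++ " failure detail block(s) omitted".toList]
          else []) ++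
         (if (rws.length : Int) - ((pvGreedyKeep (fun r => (r.toList.length : Int) + 1) budget rws (pvGreedyKeep (fun b => (b.toList.length : Int) + 2) budget fb 0).2).1.length : Int) ≠ 0 then
            [PySem.Int.toChars ((rws.length : Int) - ((pvGreedyKeep (fun r => (r.toList.length : Int) + 1) budget rws (pvGreedyKeep (fun b => (b.toList.length : Int) + 2) budget fb 0).2).1.length : Int)) ++ " additional test row(s) omitted".toList]
          else [])) ++
        " to keep the summary under ".toList ++ PySem.Int.toChars mc ++
        " characters. See the workflow run page for the full list._\n".toList))
    = pvTruncatedDoc stats heading fb table rws budget mc := by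
  unfold pvTruncatedDoc
  dsimp only
  have hposf : ∀ c ∈ fb.map (fun b => (b.toList.length : Int) + 2), 0 < c := by
    intro c hc; rcases List.mem_map.mp hc with ⟨x, _, rfl⟩
    have := Int.natCast_nonneg x.toList.length; omega
  have hposr : ∀ c ∈ rws.map (fun r => (r.toList.length : Int) + 1), 0 < c := by
    intro c hc; rcases List.mem_map.mp hc with ⟨x, _, rfl⟩
    have := Int.natCast_nonneg x.toList.length; omega
  have hposf' : ∀ x ∈ fb, 0 < (x.toList.length : Int) + 2 := by
    intro x _; have := Int.natCast_nonneg x.toList.length; omega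
  have hposr' : ∀ x ∈ rws, 0 < (x.toList.length : Int) + 1 := by
    intro x _; have := Int.natCast_nonneg x.toList.length; omega
  rw [pvCut_eq_countP _ _ hposf]
  rw [consumed_eq_sum_take (fb.map (fun b => (b.toList.length : Int) + 2)) budget]
  rw [pvCut_eq_countP _ _ hposr]
  rw [pvGreedy_eq_take _ _ fb 0 hposf']
  dsimp only
  rw [zero_add]
  rw [pvGreedy_eq_take _ _ rws _ hposr']
  dsimp only
  rw [countP_shift (rws.map (fun r => (r.toList.length : Int) + 1)) _ budget]
  have hnfle : (pvPrefixSums (fb.map (fun b => (b.toList.length : Int) + 2)) 0).countP (fun p => p ≤ budget) ≤ fb.length := by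
    have := countP_le_length_prefix (fb.map (fun b => (b.toList.length : Int) + 2)) 0 budget
    simpa using this
  set nf := (pvPrefixSums (fb.map (fun b => (b.toList.length : Int) + 2)) 0).countP (fun p => p ≤ budget) with hnfdef
  set lim := budget - ((fb.map (fun b => (b.toList.length : Int) + 2)).take nf).sum with hlimdef
  have hnrle : (pvPrefixSums (rws.map (fun r => (r.toList.length : Int) + 1)) 0).countP (fun p => p ≤ lim) ≤ rws.length := by
    have := countP_le_length_prefix (rws.map (fun r => (r.toList.length : Int) + 1)) 0 lim
    simpa using this
  set nr := (pvPrefixSums (rws.map (fun r => (r.toList.length : Int) + 1)) 0).countP (fun p => p ≤ lim) with hnrdef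
  have hlenf : (fb.take nf).length = nf := by simp [List.length_take, hnfle]
  have hlenr : (rws.take nr).length = nr := by simp [List.length_take, hnrle]
  rw [hlenf, hlenr, ite_omitted fb.length nf hnfle, ite_omitted rws.length nr hnrle]
  rfl

-- ===== VERDICT =====
set_option maxHeartbeats 1000000 in
theorem assemble_with_truncation_py_spec : Claim_equal_assemble_with_truncation_py := by
  intro header_lines failure_blocks table_header rows max_chars _
  unfold Spec_assemble_with_truncation_py assemble_with_truncation_py assemble_with_truncation_py_alt
  dsimp only
  cases hfb : failure_blocks.isEmpty <;>
    simp only [hfb, Bool.false_eq_true, if_false, if_true] <;>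
    · split
      · simp only [pvJoinDoc, hfb, Bool.false_eq_true, if_false, if_true, List.append_nil]
      · rw [else_branch]
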